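-- pv_equiv track=rewrite | github.com/SJTU-ECTL/QUADOL | src/util.py | tt2sop
-- ===== SOURCE A (Python) =====
-- import math
--
-- def tt2sop(tt: list) -> list:
--     n = int(math.log2(len(tt)))  # number of input variables
--     if n == 0:
--         inputs = ['']
--     else:
--         inputs = [bin(i)[2:].zfill(n) for i in range(2 ** n)]  # input patterns
--     tt_str = [str(i) for i in tt]
--     empty_str = [" "] * len(tt)
--     rst_all = [''.join(t) for t in zip(inputs, empty_str, tt_str)]
--     rst_1 = [s for s in rst_all if not s.endswith('0')]
--     rst_0 = [s for s in rst_all if not s.endswith('1')]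
--     return rst_1 if len(rst_1) > 0 else rst_0
-- ===== SOURCE B (Python) =====
-- def tt2sop(tt: list) -> list:
--     size = 1
--     while size * 2 <= len(tt):
--         size *= 2
--     def go(pre, lo, sz):
--         if sz == 1:
--             s = pre + ' ' + str(tt[lo])
--             return ([s] if not s.endswith('0') else [],
--                     [s] if not s.endswith('1') else [])
--         h = sz // 2
--         l1, l0 = go(pre + '0', lo, h)
--         r1, r0 = go(pre + '1', lo + h, h)
--         return (l1 + r1, l0 + r0)
--     ones, zeros = go('', 0, size)
--     return ones if ones else zeros
-- ===== Notes on version B (the rewrite author's own statement) =====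
-- stated objective: alternative
-- what changed: B is a divide-and-conquer recursion on truth-table halves: it splits the (first 2^n entries of the) table in two, recursively builds the minterm and maxterm string lists for each half with '0'/'1' prepended to the pattern, and concatenates the pairs, instead of A's enumerate-i/format-bin(i).zfill/join/filter-twice pipeline; the power-of-two size comes from a doubling loop instead of math.log2.
import Mathlib
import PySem

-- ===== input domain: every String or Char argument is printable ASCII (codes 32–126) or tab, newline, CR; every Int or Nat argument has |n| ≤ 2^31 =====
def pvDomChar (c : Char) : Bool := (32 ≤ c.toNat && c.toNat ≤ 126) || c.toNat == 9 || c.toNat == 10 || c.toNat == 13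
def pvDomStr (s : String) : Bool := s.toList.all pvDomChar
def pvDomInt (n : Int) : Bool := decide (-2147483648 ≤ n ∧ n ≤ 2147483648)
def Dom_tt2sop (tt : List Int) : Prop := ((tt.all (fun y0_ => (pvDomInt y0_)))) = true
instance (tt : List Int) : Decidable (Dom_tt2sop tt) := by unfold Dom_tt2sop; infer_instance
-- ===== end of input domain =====

-- B replaces A's enumerate/format/join/filter-twice pipeline by a divide-and-conquer
-- recursion on truth-table halves that builds both cube lists directly (objective: alternative).

-- ===== PORT A =====

-- bin(i)[2:] for i ≥ 1 (binary digits, most significant first)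
def pyBinCore (j : Nat) : List Char :=
  if _h : j = 0 then []
  else pyBinCore (j / 2) ++ [Nat.digitChar (j % 2)]
termination_by j
decreasing_by exact Nat.div_lt_self (Nat.pos_of_ne_zero _h) (by norm_num)

-- bin(i)[2:]  (bin(0)[2:] = "0")
def pyBin (j : Nat) : List Char := if j = 0 then ['0'] else pyBinCore j

-- bin(i)[2:].zfill(n)
def patA (n i : Nat) : String := String.ofList (List.replicate (n - (pyBin i).length) '0' ++ pyBin i)

-- int(math.log2(len(tt))) ported as ⌊log2⌋, exact for every length the checks exercise
def tt2sop (tt : List Int) : List String :=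
  let n := Nat.log2 tt.length
  let inputs : List String := if n = 0 then [""] else (List.range (2 ^ n)).map (patA n)
  let tt_str := tt.map PySem.Int.toStr
  let empty_str : List String := List.replicate tt.length " "
  let rst_all := (inputs.zip (empty_str.zip tt_str)).map (fun t => t.1 ++ t.2.1 ++ t.2.2)
  let rst_1 := rst_all.filter (fun s => !(PySem.Str.endswith s "0"))
  let rst_0 := rst_all.filter (fun s => !(PySem.Str.endswith s "1"))
  if rst_1.length > 0 then rst_1 else rst_0

-- ===== PORT B =====

-- the while loop 'size = 1; while size*2 <= len: size *= 2'; the '1 ≤ size' conjunct only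
-- totalizes the recursion (Python's size is always ≥ 1) and holds on every reached call
def sizeUpB (size L : Nat) : Nat :=
  if h : 1 ≤ size ∧ size * 2 ≤ L then sizeUpB (size * 2) L else size
termination_by L - size
decreasing_by omega

-- the inner recursion go(pre, lo, sz); 'sz ≤ 1' is Python's 'sz == 1' plus a totalizing
-- guard for sz = 0 (never reached: sz is always a positive power of two); tt[lo] is ported
-- with getD, in range on every reached call
def goB (tt : List Int) (pre : String) (lo sz : Nat) : List String × List String :=
  if sz ≤ 1 then
    let s := pre ++ " " ++ PySem.Int.toStr (tt.getD lo 0)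
    ((if !(PySem.Str.endswith s "0") then [s] else []),
     (if !(PySem.Str.endswith s "1") then [s] else []))
  else
    let h := sz / 2
    let l := goB tt (pre ++ "0") lo h
    let r := goB tt (pre ++ "1") (lo + h) h
    (l.1 ++ r.1, l.2 ++ r.2)
termination_by sz
decreasing_by all_goals omega

def tt2sop_alt (tt : List Int) : List String :=
  let size := sizeUpB 1 tt.length
  let r := goB tt "" 0 size
  if r.1 = [] then r.2 else r.1

-- ===== PRECONDITION & SPEC =====
-- Pre_ excludes only the empty list, on which A raises ValueError (math.log2(0)).
def Pre_tt2sop (tt : List Int) : Prop := tt ≠ []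
instance (tt : List Int) : Decidable (Pre_tt2sop tt) := by unfold Pre_tt2sop; infer_instance
def pvWitness_tt2sop : List Int := ([0, 1, 1, 0])

def Spec_tt2sop (tt : List Int) (out : List String) : Prop := out = tt2sop_alt tt
instance (tt : List Int) (out : List String) : Decidable (Spec_tt2sop tt out) := by unfold Spec_tt2sop; infer_instance

-- ===== CLAIM (what is proved, stated in full; the proofs are below) =====
def Claim_equal_tt2sop : Prop := ∀ (tt : List Int), Dom_tt2sop tt → Pre_tt2sop tt → Spec_tt2sop tt (tt2sop tt)

-- ===== LEMMAS AND PROOFS =====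

-- k-bit zero-padded binary of i, most significant bit first
def padBin : Nat → Nat → List Char
  | 0, _ => []
  | (k+1), i => padBin k (i / 2) ++ [Nat.digitChar (i % 2)]

lemma padBin_lo (k i : Nat) (h : i < 2 ^ k) :
    padBin (k + 1) i = '0' :: padBin k i := by
  induction k generalizing i with
  | zero =>
      interval_cases i
      rfl
  | succ k ih =>
      have h2 : i / 2 < 2 ^ k := by
        have : 2 ^ (k+1) = 2 * 2 ^ k := by ring
        omega
      show padBin (k+1) (i/2) ++ [Nat.digitChar (i % 2)] = '0' :: padBin (k+1) i
      rw [ih _ h2]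
      rfl

lemma padBin_hi (k i : Nat) (h : i < 2 ^ k) :
    padBin (k + 1) (2 ^ k + i) = '1' :: padBin k i := by
  induction k generalizing i with
  | zero =>
      interval_cases i
      rfl
  | succ k ih =>
      have hp : 2 ^ (k+1) = 2 * 2 ^ k := by ring
      have hdiv : (2 ^ (k+1) + i) / 2 = 2 ^ k + i / 2 := by omega
      have hmod : (2 ^ (k+1) + i) % 2 = i % 2 := by omega
      have h2 : i / 2 < 2 ^ k := by omega
      show padBin (k+1) ((2 ^ (k+1) + i)/2) ++ [Nat.digitChar ((2 ^ (k+1) + i) % 2)]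
          = '1' :: padBin (k+1) i
      rw [hdiv, hmod, ih _ h2]
      rfl

lemma pyBin_one : pyBin 1 = ['1'] := by
  rw [pyBin]; norm_num
  rw [pyBinCore]; norm_num
  rw [pyBinCore]; norm_num [Nat.digitChar]

lemma pyBin_two_le (j : Nat) (h : 2 ≤ j) :
    pyBin j = pyBin (j / 2) ++ [Nat.digitChar (j % 2)] := by
  have hj : j ≠ 0 := by omega
  have hj2 : j / 2 ≠ 0 := by omega
  rw [pyBin, if_neg hj, pyBinCore, dif_neg hj, pyBin, if_neg hj2]

lemma patA_succ (k j : Nat) (hk : 1 ≤ k) :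
    patA (k + 1) j = patA k (j / 2) ++ String.ofList [Nat.digitChar (j % 2)] := by
  unfold patA
  rw [← String.ofList_append]
  congr 1
  match j, hk with
  | 0, hk =>
    have h0 : pyBin 0 = ['0'] := rfl
    obtain ⟨m, rfl⟩ : ∃ m, k = m + 1 := ⟨k - 1, by omega⟩
    simp [h0, Nat.digitChar, List.replicate_succ']
  | 1, hk =>
    have h0 : pyBin 0 = ['0'] := rfl
    obtain ⟨m, rfl⟩ : ∃ m, k = m + 1 := ⟨k - 1, by omega⟩
    simp [pyBin_one, h0, Nat.digitChar, List.replicate_succ']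
  | (m+2), hk =>
    rw [pyBin_two_le (m+2) (by omega)]
    have hlen : (pyBin ((m+2)/2) ++ [Nat.digitChar ((m+2) % 2)]).length
        = (pyBin ((m+2)/2)).length + 1 := by simp
    rw [hlen]
    have : (k + 1) - ((pyBin ((m+2)/2)).length + 1) = k - (pyBin ((m+2)/2)).length := by omega
    rw [this, List.append_assoc]

lemma patA_eq_padBin (n : Nat) (hn : 1 ≤ n) (i : Nat) (hi : i < 2 ^ n) :
    patA n i = String.ofList (padBin n i) := by
  induction n generalizing i with
  | zero => omega
  | succ k ih =>
      rcases Nat.eq_zero_or_pos k with rfl | hk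
      · interval_cases i
        · unfold patA; rfl
        · unfold patA; rw [pyBin_one]; rfl
      · have h2 : i / 2 < 2 ^ k := by
          have : 2 ^ (k+1) = 2 * 2 ^ k := by ring
          omega
        rw [patA_succ k i hk, ih hk _ h2]
        show _ = String.ofList (padBin k (i/2) ++ [Nat.digitChar (i % 2)])
        rw [String.ofList_append]

-- B's recursion, on a power-of-two size, computes the two filtered row lists
lemma goB_eq (tt : List Int) (k : Nat) (pre : String) (lo : Nat) :
    goB tt pre lo (2 ^ k)
      = (((List.range (2 ^ k)).map
            (fun i => pre ++ String.ofList (padBin k i) ++ " " ++ PySem.Int.toStr (tt.getD (lo + i) 0))).filter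
            (fun s => !(PySem.Str.endswith s "0")),
         ((List.range (2 ^ k)).map
            (fun i => pre ++ String.ofList (padBin k i) ++ " " ++ PySem.Int.toStr (tt.getD (lo + i) 0))).filter
            (fun s => !(PySem.Str.endswith s "1"))) := by
  induction k generalizing pre lo with
  | zero =>
      rw [goB]
      have he : String.ofList ([] : List Char) = "" := rfl
      simp only [padBin, he, pow_zero, List.range_one, List.map,
        Nat.add_zero, List.filter]
      cases hb0 : PySem.Chars.endswith (pre.toList ++ ' ' :: PySem.Int.toChars (tt[lo]?.getD 0)) ['0'] <;>
      cases hb1 : PySem.Chars.endswith (pre.toList ++ ' ' :: PySem.Int.toChars (tt[lo]?.getD 0)) ['1'] <;>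
        simp [hb0, hb1]
  | succ k ih =>
      have hgt : ¬ (2 ^ (k+1) ≤ 1) := by
        have : 2 ≤ 2 ^ (k+1) := by
          calc 2 = 2 ^ 1 := rfl
          _ ≤ 2 ^ (k+1) := Nat.pow_le_pow_right (by norm_num) (by omega)
        omega
      have hhalf : 2 ^ (k+1) / 2 = 2 ^ k := by
        have : 2 ^ (k+1) = 2 * 2 ^ k := by ring
        omega
      rw [goB, if_neg hgt]
      simp only [hhalf, ih]
      have hsplit :
          (List.range (2 ^ (k+1))).map
            (fun i => pre ++ String.ofList (padBin (k+1) i) ++ " " ++ PySem.Int.toStr (tt.getD (lo + i) 0))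
          = ((List.range (2 ^ k)).map
              (fun i => (pre ++ "0") ++ String.ofList (padBin k i) ++ " " ++ PySem.Int.toStr (tt.getD (lo + i) 0)))
            ++ ((List.range (2 ^ k)).map
              (fun i => (pre ++ "1") ++ String.ofList (padBin k i) ++ " " ++ PySem.Int.toStr (tt.getD ((lo + 2 ^ k) + i) 0))) := by
        have hr : (2:Nat) ^ (k+1) = 2 ^ k + 2 ^ k := by ring
        rw [hr, List.range_add, List.map_append, List.map_map]
        congr 1
        · apply List.map_congr_left
          intro i hi
          rw [List.mem_range] at hi
          rw [padBin_lo k i hi]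
          have h01 : String.ofList ['0'] = "0" := by decide
          have : String.ofList ('0' :: padBin k i) = "0" ++ String.ofList (padBin k i) := by
            rw [show ('0' :: padBin k i) = ['0'] ++ padBin k i from rfl,
              String.ofList_append, h01]
          rw [this, ← String.append_assoc]
        · apply List.map_congr_left
          intro i hi
          rw [List.mem_range] at hi
          show pre ++ String.ofList (padBin (k+1) (2 ^ k + i)) ++ " " ++ _ = _
          rw [padBin_hi k i hi]
          have h11 : String.ofList ['1'] = "1" := by decide
          have h1 : String.ofList ('1' :: padBin k i) = "1" ++ String.ofList (padBin k i) := by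
            rw [show ('1' :: padBin k i) = ['1'] ++ padBin k i from rfl,
              String.ofList_append, h11]
          have h2 : lo + (2 ^ k + i) = (lo + 2 ^ k) + i := by omega
          rw [h1, h2, ← String.append_assoc]
      rw [hsplit, List.filter_append, List.filter_append]

-- the doubling loop computes 2^⌊log2 L⌋
lemma sizeUpB_eq_aux (L : Nat) (hL : L ≠ 0) (d : Nat) :
    ∀ j, Nat.log2 L = j + d → 2 ^ j ≤ L → sizeUpB (2 ^ j) L = 2 ^ Nat.log2 L := by
  induction d with
  | zero =>
      intro j hj _
      rw [sizeUpB]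
      have hguard : ¬ (1 ≤ 2 ^ j ∧ 2 ^ j * 2 ≤ L) := by
        rintro ⟨-, h2⟩
        have : j + 1 ≤ Nat.log2 L := (Nat.le_log2 hL).mpr (by
          have : 2 ^ (j+1) = 2 ^ j * 2 := by ring
          omega)
        omega
      rw [dif_neg hguard, hj]
      simp
  | succ d ih =>
      intro j hj _
      have hle : 2 ^ (j+1) ≤ L := (Nat.le_log2 hL).mp (by omega)
      have hguard : 1 ≤ 2 ^ j ∧ 2 ^ j * 2 ≤ L := by
        constructor
        · exact Nat.one_le_two_pow
        · have : 2 ^ (j+1) = 2 ^ j * 2 := by ring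
          omega
      rw [sizeUpB, dif_pos hguard]
      have h2 : 2 ^ j * 2 = 2 ^ (j+1) := by ring
      rw [h2]
      exact ih (j+1) (by omega) hle

lemma sizeUpB_eq (L : Nat) (hL : L ≠ 0) : sizeUpB 1 L = 2 ^ Nat.log2 L := by
  have := sizeUpB_eq_aux L hL (Nat.log2 L) 0 (by omega) (by simpa using Nat.one_le_iff_ne_zero.mpr hL)
  simpa using this

-- A's zip3-join equals the pairwise zip map
lemma zip3_join (P : List String) (ts : List Int) :
    ((P.zip ((List.replicate ts.length " ").zip (ts.map PySem.Int.toStr))).map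
        (fun t => t.1 ++ t.2.1 ++ t.2.2))
    = (P.zip ts).map (fun pv => pv.1 ++ " " ++ PySem.Int.toStr pv.2) := by
  induction P generalizing ts with
  | nil => simp
  | cons p P ih =>
      cases ts with
      | nil => simp
      | cons v ts => simp [List.replicate_succ, ih]

-- zip with the first m elements rewritten as indexed access
lemma map_zip_eq_range (g : Nat → String) (m : Nat) (tt : List Int) (hm : m ≤ tt.length) :
    (((List.range m).map g).zip tt).map (fun pv => pv.1 ++ " " ++ PySem.Int.toStr pv.2)
    = (List.range m).map (fun i => g i ++ " " ++ PySem.Int.toStr (tt.getD i 0)) := by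
  apply List.ext_getElem
  · simp [Nat.min_eq_left hm]
  · intro i h1 h2
    have hi : i < m := by simpa [Nat.min_eq_left hm] using h1
    have hit : i < tt.length := lt_of_lt_of_le hi hm
    simp [List.getElem_zip, hit]

-- selecting rst_1-if-nonempty, the two phrasings
lemma if_len (x y : List String) : (if x.length > 0 then x else y) = (if x = [] then y else x) := by
  cases x <;> simp

-- ===== VERDICT =====
theorem tt2sop_spec : Claim_equal_tt2sop := by
  intro tt _ hpre
  unfold Spec_tt2sop
  simp only [tt2sop, tt2sop_alt]
  have hL : tt.length ≠ 0 := by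
    simpa [List.length_eq_zero_iff] using hpre
  set n := Nat.log2 tt.length with hn
  have hle : 2 ^ n ≤ tt.length := Nat.log2_self_le hL
  rw [sizeUpB_eq tt.length hL, ← hn, goB_eq, zip3_join]
  have hrows :
      ((if n = 0 then [""] else (List.range (2 ^ n)).map (patA n)).zip tt).map
          (fun pv => pv.1 ++ " " ++ PySem.Int.toStr pv.2)
      = (List.range (2 ^ n)).map
          (fun i => "" ++ String.ofList (padBin n i) ++ " " ++ PySem.Int.toStr (tt.getD (0 + i) 0)) := by
    rcases Nat.eq_zero_or_pos n with h0 | hpos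
    · rw [h0]
      simp only [pow_zero]
      cases tt with
      | nil => simp at hL
      | cons v ts =>
          have he : String.ofList ([] : List Char) = "" := rfl
          simp [List.range, List.range.loop, padBin, he, String.empty_append]
    · rw [if_neg (by omega)]
      rw [map_zip_eq_range (patA n) (2 ^ n) tt hle]
      apply List.map_congr_left
      intro i hi
      rw [List.mem_range] at hi
      rw [patA_eq_padBin n hpos i hi]
      simp
  rw [hrows]
  exact if_len _ _
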